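-- pv_equiv track=rewrite | github.com/zhaoyunmuyu/CoPaw | src/swe/app/routers/mcp.py | _validate_target_tenant_id
-- ===== SOURCE A (Python) =====
-- def _validate_target_tenant_id(tenant_id: str) -> str:
--     tenant_id = str(tenant_id or "").strip()
--     if not tenant_id:
--         raise ValueError("tenant_id is required")
--     if len(tenant_id) > 256:
--         raise ValueError(f"Invalid tenant ID format: {tenant_id}")
--     if ".." in tenant_id or "/" in tenant_id or "\\" in tenant_id:
--         raise ValueError(f"Invalid tenant ID format: {tenant_id}")
--     if any(ord(c) < 32 for c in tenant_id):
--         raise ValueError(f"Invalid tenant ID format: {tenant_id}")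
--     return tenant_id
-- ===== SOURCE B (Python) =====
-- def _validate_target_tenant_id(tenant_id: str) -> str:
--     s = str(tenant_id or "").strip()
--     if not s:
--         raise ValueError("tenant_id is required")
--     if len(s) > 256:
--         raise ValueError(f"Invalid tenant ID format: {s}")
--     prev = ""
--     for c in s:
--         if ord(c) < 32 or c == "/" or c == "\\" or (prev == "." and c == "."):
--             raise ValueError(f"Invalid tenant ID format: {s}")
--         prev = c
--     return s
-- ===== Notes on version B (the rewrite author's own statement) =====
-- stated objective: alternative
-- what changed: The three separate scans (substring '..', '/' and '\' membership, and the any(ord(c)<32) generator) are fused into one character loop that carries the previous character to detect consecutive dots.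
import Mathlib
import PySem

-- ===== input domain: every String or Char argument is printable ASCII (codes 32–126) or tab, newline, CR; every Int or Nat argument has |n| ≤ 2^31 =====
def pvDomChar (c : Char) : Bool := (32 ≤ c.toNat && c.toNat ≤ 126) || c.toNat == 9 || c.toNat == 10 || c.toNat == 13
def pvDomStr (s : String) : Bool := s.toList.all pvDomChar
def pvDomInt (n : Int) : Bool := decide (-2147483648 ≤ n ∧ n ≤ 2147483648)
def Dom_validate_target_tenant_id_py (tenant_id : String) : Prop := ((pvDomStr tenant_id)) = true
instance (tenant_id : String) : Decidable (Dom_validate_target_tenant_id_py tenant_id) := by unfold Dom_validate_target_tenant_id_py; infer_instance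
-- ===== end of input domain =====

-- B fuses A's three separate scans into one character loop carrying the previous character (objective: alternative, same cost).
-- Both ports return "" exactly where the Python raises ValueError; Pre_ excludes precisely those inputs.

-- ===== PORT A =====
-- literal transliteration of A: strip, then the four raise-guards in order (a raise is modelled as "" , excluded by Pre_)
def validate_target_tenant_id_py (tenant_id : String) : String :=
  let t := PySem.Str.strip tenant_id
  if PySem.Str.len t = 0 then ""                 -- raise ValueError("tenant_id is required")
  else if 256 < PySem.Str.len t then ""          -- raise ValueError(f"Invalid tenant ID format: {t}")
  else if PySem.Str.isIn ".." t || PySem.Str.isIn "/" t || PySem.Str.isIn "\\" t then ""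
  else if t.toList.any (fun c => c.toNat < 32) then ""
  else t

-- ===== PORT B =====
-- the fused loop of Source B: prev = "" is modelled as none, prev = c as some c; true = the loop raises
def pvAltScan (prev : Option Char) : List Char → Bool
  | [] => false
  | c :: rest =>
    if c.toNat < 32 || c = '/' || c = '\\' || (prev = some '.' && c = '.') then true
    else pvAltScan (some c) rest

def validate_target_tenant_id_py_alt (tenant_id : String) : String :=
  let t := PySem.Str.strip tenant_id
  if PySem.Str.len t = 0 then ""
  else if 256 < PySem.Str.len t then ""
  else if pvAltScan none t.toList then ""
  else t

-- ===== PRECONDITION & SPEC =====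
-- Pre_ excludes exactly the inputs on which A raises ValueError (empty after strip, longer than 256,
-- containing "..", '/', '\' or a control character); both programs raise there.
def Pre_validate_target_tenant_id_py (tenant_id : String) : Prop :=
  (PySem.Str.strip tenant_id).toList ≠ [] ∧
  (PySem.Str.strip tenant_id).toList.length ≤ 256 ∧
  (PySem.Str.strip tenant_id).toList.all (fun c => 32 ≤ c.toNat && c != '/' && c != '\\') = true ∧
  ¬ ['.', '.'] <:+: (PySem.Str.strip tenant_id).toList
instance (tenant_id : String) : Decidable (Pre_validate_target_tenant_id_py tenant_id) := by
  unfold Pre_validate_target_tenant_id_py; infer_instance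

def pvWitness_validate_target_tenant_id_py : String := "tenant.01"

def Spec_validate_target_tenant_id_py (tenant_id : String) (out : String) : Prop := out = validate_target_tenant_id_py_alt tenant_id
instance (tenant_id : String) (out : String) : Decidable (Spec_validate_target_tenant_id_py tenant_id out) := by unfold Spec_validate_target_tenant_id_py; infer_instance

-- ===== CLAIM (what is proved, stated in full; the proofs are below) =====
def Claim_equal_validate_target_tenant_id_py : Prop := ∀ (tenant_id : String), Dom_validate_target_tenant_id_py tenant_id → Pre_validate_target_tenant_id_py tenant_id → Spec_validate_target_tenant_id_py tenant_id (validate_target_tenant_id_py tenant_id)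

-- ===== LEMMAS AND PROOFS =====

-- the fused scan finds nothing when no character is forbidden and ".." is not a substring
lemma pvAltScan_false (l : List Char) (prev : Option Char)
    (hgood : ∀ c ∈ l, 32 ≤ c.toNat ∧ c ≠ '/' ∧ c ≠ '\\')
    (hdd : ¬ ['.', '.'] <:+: l)
    (hprev : prev = some '.' → ∀ t, l ≠ '.' :: t) :
    pvAltScan prev l = false := by
  induction l generalizing prev with
  | nil => rfl
  | cons c rest ih =>
    obtain ⟨h1, h2, h3⟩ := hgood c (List.mem_cons_self ..)
    have hcdot : c = '.' → ∀ t, rest ≠ '.' :: t := by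
      rintro rfl t rfl
      exact hdd (List.prefix_append ['.', '.'] t).isInfix
    simp only [pvAltScan]
    rw [if_neg, ih (some c)]
    · exact fun c' hc' => hgood c' (List.mem_cons_of_mem _ hc')
    · exact fun h => hdd (h.trans (List.suffix_cons c rest).isInfix)
    · exact fun hp => hcdot (Option.some.inj hp)
    · intro h
      simp only [Bool.or_eq_true, Bool.and_eq_true, decide_eq_true_eq] at h
      rcases h with ((h | h) | h) | ⟨hp, hcd⟩
      · omega
      · exact h2 h
      · exact h3 h
      · exact hprev hp rest (by rw [hcd])

set_option maxHeartbeats 1000000 in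
theorem validate_target_tenant_id_py_spec : Claim_equal_validate_target_tenant_id_py := by
  intro tenant_id _ hpre
  obtain ⟨hne, hlen, hgoodb, hdd⟩ := hpre
  simp only [List.all_eq_true, Bool.and_eq_true, bne_iff_ne, decide_eq_true_eq] at hgoodb
  have hgood : ∀ c ∈ (PySem.Str.strip tenant_id).toList, 32 ≤ c.toNat ∧ c ≠ '/' ∧ c ≠ '\\' := by
    intro c hc; have h := hgoodb c hc; tauto
  unfold Spec_validate_target_tenant_id_py
  unfold validate_target_tenant_id_py validate_target_tenant_id_py_alt
  have hlen0 : ¬ PySem.Str.len (PySem.Str.strip tenant_id) = 0 := by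
    rw [PySem.Str.len_eq]; simpa using hne
  have hlen256 : ¬ 256 < PySem.Str.len (PySem.Str.strip tenant_id) := by
    rw [PySem.Str.len_eq]; omega
  have hin : ¬ (PySem.Str.isIn ".." (PySem.Str.strip tenant_id) ||
      PySem.Str.isIn "/" (PySem.Str.strip tenant_id) ||
      PySem.Str.isIn "\\" (PySem.Str.strip tenant_id)) = true := by
    intro h
    simp only [Bool.or_eq_true, PySem.Str.isIn_iff_infix] at h
    have e1 : "..".toList = ['.', '.'] := by decide
    have e2 : "/".toList = ['/'] := by decide
    have e3 : "\\".toList = ['\\'] := by decide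
    rcases h with (h | h) | h
    · rw [e1] at h; exact hdd h
    · rw [e2] at h
      exact (hgood '/' (h.subset (List.mem_singleton_self '/'))).2.1 rfl
    · rw [e3] at h
      exact (hgood '\\' (h.subset (List.mem_singleton_self '\\'))).2.2 rfl
  have hctrl : ¬ (PySem.Str.strip tenant_id).toList.any (fun c => c.toNat < 32) = true := by
    simp only [List.any_eq_true, decide_eq_true_eq]
    rintro ⟨c, hc, hlt⟩
    exact absurd (hgood c hc).1 (by omega)
  have hscan : pvAltScan none (PySem.Str.strip tenant_id).toList = false :=
    pvAltScan_false _ none hgood hdd (by simp)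
  simp only [hlen0, hlen256, hin, hctrl, hscan, if_false, Bool.false_eq_true]
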